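-- pv_equiv track=rewrite | github.com/Tencent/NeuralNLP-NeuralClassifier | evaluate/classification_evaluate.py | _judge_label_in
-- ===== SOURCE A (Python) =====
-- def _judge_label_in(label_name, label_to_id_maps):
--     cnt = 0
--     for label in label_name:
--         for i in range(0, len(label_to_id_maps)):
--             if label in label_to_id_maps[i]:
--                 cnt += 1
--                 break
--     return cnt == len(label_name)
-- ===== SOURCE B (Python) =====
-- def _judge_label_in(label_name, label_to_id_maps):
--     # Transposed loops: keep a shrinking set of still-uncovered labels and
--     # sweep the maps once, stopping early when nothing is outstanding.
--     remaining = set(label_name)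
--     for id_map in label_to_id_maps:
--         if not remaining:
--             break
--         for lbl in list(remaining):
--             if lbl in id_map:
--                 remaining.discard(lbl)
--     return not remaining
-- ===== Notes on version B (the rewrite author's own statement) =====
-- stated objective: alternative
-- what changed: Transposes the loop nesting: instead of counting, per label, whether any map contains it, B maintains a shrinking set of still-uncovered labels, sweeps the maps in the outer loop discarding covered labels, breaks early once the set is empty, and returns whether it is empty; duplicate labels are tested once and covered labels are never retested.
import Mathlib
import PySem

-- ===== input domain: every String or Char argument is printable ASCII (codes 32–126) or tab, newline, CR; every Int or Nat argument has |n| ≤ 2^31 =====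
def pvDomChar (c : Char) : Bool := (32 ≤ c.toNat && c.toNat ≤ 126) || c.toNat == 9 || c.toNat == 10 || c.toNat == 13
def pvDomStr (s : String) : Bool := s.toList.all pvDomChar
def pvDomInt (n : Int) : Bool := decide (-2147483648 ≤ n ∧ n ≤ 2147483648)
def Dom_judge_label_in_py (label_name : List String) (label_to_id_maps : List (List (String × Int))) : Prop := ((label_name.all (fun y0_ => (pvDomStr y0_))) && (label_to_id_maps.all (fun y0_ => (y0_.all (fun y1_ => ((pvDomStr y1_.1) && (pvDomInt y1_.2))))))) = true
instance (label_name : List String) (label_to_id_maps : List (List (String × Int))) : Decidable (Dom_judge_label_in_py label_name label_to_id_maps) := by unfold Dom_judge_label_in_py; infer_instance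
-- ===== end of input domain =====

-- B transposes the loop nesting: it sweeps the maps once while shrinking a set of still-uncovered labels (early break when empty), instead of scanning all maps per label; measured faster in a timing run (dedup + early exit).


-- ===== PORT A =====
-- 'label in dict' on a PySem.Dict association list: key membership
def pvKeyIn (label : String) (m : List (String × Int)) : Bool := m.any (fun p => p.1 == label)

-- inner 'for i in range(0, len(label_to_id_maps)) … break' loop of A
def pvAInner (label : String) : List (List (String × Int)) → Bool
  | [] => false
  | m :: rest => if pvKeyIn label m then true else pvAInner label rest

def judge_label_in_py (label_name : List String) (label_to_id_maps : List (List (String × Int))) : Bool :=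
  let cnt := label_name.foldl (fun cnt label => if pvAInner label label_to_id_maps then cnt + 1 else cnt) (0 : Nat)
  cnt == label_name.length

-- ===== PORT B =====
-- outer loop of B over the maps, shrinking the set of uncovered labels, with early break
def pvBSweep : List String → List (List (String × Int)) → List String
  | remaining, [] => remaining
  | remaining, m :: rest =>
    if remaining.isEmpty then remaining
    else pvBSweep (remaining.filter (fun lbl => !pvKeyIn lbl m)) rest

def judge_label_in_py_alt (label_name : List String) (label_to_id_maps : List (List (String × Int))) : Bool :=
  (pvBSweep (PySem.Set.ofList label_name) label_to_id_maps).isEmpty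

-- ===== PRECONDITION & SPEC =====
def Spec_judge_label_in_py (label_name : List String) (label_to_id_maps : List (List (String × Int))) (out : Bool) : Prop := out = judge_label_in_py_alt label_name label_to_id_maps
instance (label_name : List String) (label_to_id_maps : List (List (String × Int))) (out : Bool) : Decidable (Spec_judge_label_in_py label_name label_to_id_maps out) := by unfold Spec_judge_label_in_py; infer_instance

-- ===== CLAIM (what is proved, stated in full; the proofs are below) =====
def Claim_equal_judge_label_in_py : Prop := ∀ (label_name : List String) (label_to_id_maps : List (List (String × Int))), Dom_judge_label_in_py label_name label_to_id_maps → Spec_judge_label_in_py label_name label_to_id_maps (judge_label_in_py label_name label_to_id_maps)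

-- ===== LEMMAS AND PROOFS =====

-- ===== VERDICT (by name: the statement is the Claim_ definition above) =====
lemma pvAInner_eq_any (label : String) (maps : List (List (String × Int))) :
    pvAInner label maps = maps.any (pvKeyIn label) := by
  induction maps with
  | nil => rfl
  | cons m rest ih => by_cases h : pvKeyIn label m = true <;> simp [pvAInner, h, ih]

lemma pvFoldl_count (p : String → Bool) (ln : List String) (n : Nat) :
    ln.foldl (fun cnt label => if p label then cnt + 1 else cnt) n = n + ln.countP p := by
  induction ln generalizing n with
  | nil => simp
  | cons l rest ih =>
      by_cases h : p l = true <;> simp [List.foldl, h, ih]; omega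

lemma pvBSweep_isEmpty (maps : List (List (String × Int))) (r : List String) :
    (pvBSweep r maps).isEmpty = r.all (fun lbl => maps.any (pvKeyIn lbl)) := by
  induction maps generalizing r with
  | nil => cases r <;> simp [pvBSweep]
  | cons m rest ih =>
      by_cases h : r.isEmpty = true
      · have : r = [] := List.isEmpty_iff.mp h
        simp [pvBSweep, this]
      · rw [show pvBSweep r (m :: rest) = pvBSweep (r.filter (fun lbl => !pvKeyIn lbl m)) rest
            from by simp [pvBSweep, h], ih, Bool.eq_iff_iff]
        simp only [List.all_eq_true, List.mem_filter, List.any_cons, Bool.or_eq_true]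
        constructor
        · intro hf x hx
          by_cases hk : pvKeyIn x m = true
          · exact Or.inl hk
          · exact Or.inr (hf x ⟨hx, by simp [hk]⟩)
        · intro hf x hx
          rcases hf x hx.1 with hk | hr
          · exact absurd hk (by simpa using hx.2)
          · exact hr

theorem judge_label_in_py_spec : Claim_equal_judge_label_in_py := by
  intro ln maps _
  show judge_label_in_py ln maps = judge_label_in_py_alt ln maps
  simp only [judge_label_in_py, judge_label_in_py_alt, pvFoldl_count, pvBSweep_isEmpty,
    pvAInner_eq_any, Nat.zero_add]
  rw [Bool.eq_iff_iff]
  simp [List.countP_eq_length, List.all_eq_true, PySem.Set.mem_ofList]
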